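-- pv_equiv track=rewrite | github.com/sarvajnya/Templates-and-Practice | E_Maximum_Glutton.py | max_dishes
-- ===== SOURCE A (Python) =====
-- def max_dishes(N, X, Y, A, B):
--     # Combine sweetness and saltiness into a list of tuples
--     max_dishes_count = 0
--
--     # Iterate over all possible subsets using bitmasking
--     for bitmask in range(1 << N):
--         current_sweetness = 0
--         current_saltiness = 0
--         count = 0
--
--         for i in range(N):
--             if bitmask & (1 << i):
--                 current_sweetness += A[i]
--                 current_saltiness += B[i]
--                 count += 1
--
--         if current_sweetness <= X and current_saltiness <= Y:
--             max_dishes_count = max(max_dishes_count, count)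
--
--     return max_dishes_count
-- ===== SOURCE B (Python) =====
-- def _omax(s, t):
--     # max of two "optional" best counts, None = no feasible selection
--     if s is None:
--         return t
--     if t is None:
--         return s
--     return max(s, t)
--
--
-- def max_dishes(N, X, Y, A, B):
--     def go(r, i, sw, sa):
--         # best count choosing among dishes i..i+r-1, with sums sw/sa already
--         # accumulated; None if no choice keeps both totals within the limits
--         if r == 0:
--             return 0 if sw <= X and sa <= Y else None
--         skip = go(r - 1, i + 1, sw, sa)
--         take = go(r - 1, i + 1, sw + A[i], sa + B[i])
--         if take is not None:
--             take += 1
--         return _omax(skip, take)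
--
--     res = go(N, 0, 0, 0)
--     return res if res is not None else 0
-- ===== Notes on version B (the rewrite author's own statement) =====
-- stated objective: alternative
-- what changed: Replaces the bitmask enumeration (which rescans all N items for every one of the 2^N masks) by a take/skip branching recursion that accumulates the two running sums along the way, doing O(1) work per selection instead of O(N); both remain exponential in N.
import Mathlib
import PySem

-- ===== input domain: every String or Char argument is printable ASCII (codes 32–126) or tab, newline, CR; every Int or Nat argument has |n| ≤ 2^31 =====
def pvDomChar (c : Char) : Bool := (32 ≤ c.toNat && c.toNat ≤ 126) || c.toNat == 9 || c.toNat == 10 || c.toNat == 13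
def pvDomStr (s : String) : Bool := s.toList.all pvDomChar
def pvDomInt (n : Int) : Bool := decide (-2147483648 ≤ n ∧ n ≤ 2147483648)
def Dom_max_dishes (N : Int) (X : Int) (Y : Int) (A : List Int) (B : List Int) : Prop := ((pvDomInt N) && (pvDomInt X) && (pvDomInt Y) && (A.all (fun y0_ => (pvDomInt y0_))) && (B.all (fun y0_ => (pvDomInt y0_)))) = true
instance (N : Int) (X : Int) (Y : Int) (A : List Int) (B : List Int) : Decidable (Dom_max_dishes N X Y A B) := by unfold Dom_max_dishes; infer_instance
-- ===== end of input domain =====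

-- B replaces A's bitmask enumeration (rescanning all N items per mask) by a take/skip
-- branching recursion that accumulates the running sums along the way (alternative
-- decomposition of the same exhaustive search).

-- ===== PORT A =====
-- inner 'for i in range(N)' loop of A: running (sweetness, saltiness, count) for one bitmask;
-- 'bm.testBit n' is exact for Python's nonzero test of 'bitmask & (1 << i)';
-- 'A.getD n 0' is exact for 'A[i]' under Pre_ (0 ≤ i < N ≤ len).
def aScan (A B : List Int) (bm : Nat) : Nat → Int × Int × Int
  | 0 => (0, 0, 0)
  | n + 1 =>
    let t := aScan A B bm n
    if bm.testBit n then (t.1 + A.getD n 0, t.2.1 + B.getD n 0, t.2.2 + 1) else t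

-- outer 'for bitmask in range(1 << N)' loop body of A
def aStep (X Y : Int) (A B : List Int) (n : Nat) (acc : Int) (m : Nat) : Int :=
  let t := aScan A B m n
  if t.1 ≤ X ∧ t.2.1 ≤ Y then max acc t.2.2 else acc

def max_dishes (N : Int) (X : Int) (Y : Int) (A : List Int) (B : List Int) : Int :=
  (List.range (2 ^ N.toNat)).foldl (aStep X Y A B N.toNat) 0

-- ===== PORT B =====
-- Source B's _omax: max of two optional best counts (none = infeasible)
def omax (s t : Option Int) : Option Int :=
  match s with
  | none => t
  | some sv =>
    match t with
    | none => some sv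
    | some tv => some (max sv tv)

-- Source B's go(r, i, sw, sa): structural recursion on r = number of remaining dishes
def bGo (X Y : Int) (A B : List Int) : Nat → Nat → Int → Int → Option Int
  | 0, _, sw, sa => if sw ≤ X ∧ sa ≤ Y then some 0 else none
  | r + 1, i, sw, sa =>
    let skip := bGo X Y A B r (i + 1) sw sa
    let take := (bGo X Y A B r (i + 1) (sw + A.getD i 0) (sa + B.getD i 0)).map (· + 1)
    omax skip take

def max_dishes_alt (N : Int) (X : Int) (Y : Int) (A : List Int) (B : List Int) : Int :=
  match bGo X Y A B N.toNat 0 0 0 with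
  | some r => r
  | none => 0

-- ===== PRECONDITION & SPEC =====
-- Exactly the inputs on which the Python A returns: N < 0 makes 'range(1 << N)' raise
-- ValueError, and N > len(A) or N > len(B) makes 'A[i]'/'B[i]' raise IndexError.
def Pre_max_dishes (N : Int) (X : Int) (Y : Int) (A : List Int) (B : List Int) : Prop :=
  0 ≤ N ∧ N ≤ (A.length : Int) ∧ N ≤ (B.length : Int)
instance (N : Int) (X : Int) (Y : Int) (A : List Int) (B : List Int) : Decidable (Pre_max_dishes N X Y A B) := by unfold Pre_max_dishes; infer_instance

def pvWitness_max_dishes : Int × Int × Int × List Int × List Int := (2, 10, 10, [1, 2], [2, 1])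

def Spec_max_dishes (N : Int) (X : Int) (Y : Int) (A : List Int) (B : List Int) (out : Int) : Prop := out = max_dishes_alt N X Y A B
instance (N : Int) (X : Int) (Y : Int) (A : List Int) (B : List Int) (out : Int) : Decidable (Spec_max_dishes N X Y A B out) := by unfold Spec_max_dishes; infer_instance

-- ===== CLAIM (what is proved, stated in full; the proofs are below) =====
def Claim_equal_max_dishes : Prop := ∀ (N : Int) (X : Int) (Y : Int) (A : List Int) (B : List Int), Dom_max_dishes N X Y A B → Pre_max_dishes N X Y A B → Spec_max_dishes N X Y A B (max_dishes N X Y A B)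

-- ===== LEMMAS AND PROOFS =====

-- the (sweetness, saltiness) pairs of dishes i, i+1, …, i+r-1
def items (A B : List Int) (i r : Nat) : List (Int × Int) :=
  (List.range r).map (fun j => (A.getD (i + j) 0, B.getD (i + j) 0))

-- optional best count over all sub-multisets of a dish list, head chosen first
def Mw (X Y : Int) : List (Int × Int) → Int → Int → Option Int
  | [], sw, sa => if sw ≤ X ∧ sa ≤ Y then some 0 else none
  | p :: l, sw, sa => omax (Mw X Y l sw sa) ((Mw X Y l (sw + p.1) (sa + p.2)).map (· + 1))

theorem items_succ (A B : List Int) (i r : Nat) :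
    items A B i (r + 1) = (A.getD i 0, B.getD i 0) :: items A B (i + 1) r := by
  unfold items
  rw [List.range_succ_eq_map, List.map_cons, List.map_map]
  simp only [Nat.add_zero]
  congr 1
  apply List.map_congr_left
  intro j _
  have h : i + (j + 1) = i + 1 + j := by omega
  simp [Function.comp, Nat.succ_eq_add_one, h]

theorem items_last (A B : List Int) (r : Nat) :
    items A B 0 (r + 1) = items A B 0 r ++ [(A.getD r 0, B.getD r 0)] := by
  unfold items
  rw [List.range_succ, List.map_append]
  simp

theorem bGo_eq_Mw (X Y : Int) (A B : List Int) :
    ∀ (r i : Nat) (sw sa : Int), bGo X Y A B r i sw sa = Mw X Y (items A B i r) sw sa := by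
  intro r
  induction r with
  | zero => intro i sw sa; simp [bGo, items, Mw]
  | succ r ih => intro i sw sa; rw [items_succ]; simp only [bGo, Mw, ih]

theorem Mw_append (X Y : Int) (p : Int × Int) :
    ∀ (l : List (Int × Int)) (sw sa : Int),
      Mw X Y (l ++ [p]) sw sa
        = omax (Mw X Y l sw sa) ((Mw X Y l (sw + p.1) (sa + p.2)).map (· + 1)) := by
  intro l
  induction l with
  | nil => intro sw sa; simp [Mw]
  | cons a l ih =>
    intro sw sa
    simp only [List.cons_append, Mw, ih]
    have e1 : sw + a.1 + p.1 = sw + p.1 + a.1 := by ring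
    have e2 : sa + a.2 + p.2 = sa + p.2 + a.2 := by ring
    rw [e1, e2]
    cases h00 : Mw X Y l sw sa <;>
      cases h01 : Mw X Y l (sw + p.1) (sa + p.2) <;>
        cases h10 : Mw X Y l (sw + a.1) (sa + a.2) <;>
          cases h11 : Mw X Y l (sw + p.1 + a.1) (sa + p.2 + a.2) <;>
            simp [omax] <;> omega

theorem Mw_reverse (X Y : Int) :
    ∀ (l : List (Int × Int)) (sw sa : Int), Mw X Y l.reverse sw sa = Mw X Y l sw sa := by
  intro l
  induction l with
  | nil => intro sw sa; rfl
  | cons a l ih =>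
    intro sw sa
    rw [List.reverse_cons, Mw_append]
    simp only [Mw, ih]

theorem Mw_nonneg (X Y : Int) :
    ∀ (l : List (Int × Int)) (sw sa v : Int), Mw X Y l sw sa = some v → 0 ≤ v := by
  intro l
  induction l with
  | nil =>
    intro sw sa v h
    simp only [Mw] at h
    split at h <;> simp_all
  | cons a l ih =>
    intro sw sa v h
    simp only [Mw] at h
    cases h0 : Mw X Y l sw sa <;> cases h1 : Mw X Y l (sw + a.1) (sa + a.2) <;>
      rw [h0, h1] at h <;> simp [omax] at h
    · have := ih _ _ _ h1; omega
    · have := ih _ _ _ h0; omega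
    · have g0 := ih _ _ _ h0; have g1 := ih _ _ _ h1; omega

-- lower bits of 2^n + m agree with those of m
theorem aScan_add_pow (A B : List Int) (n : Nat) (m : Nat) :
    ∀ k ≤ n, aScan A B (2 ^ n + m) k = aScan A B m k := by
  intro k
  induction k with
  | zero => intro _; rfl
  | succ k ih =>
    intro hk
    have hlt : k < n := by omega
    simp only [aScan, ih (by omega), Nat.testBit_two_pow_add_gt hlt]

theorem aScan_high (A B : List Int) (n m : Nat) (hm : m < 2 ^ n) :
    aScan A B (2 ^ n + m) (n + 1)
      = ((aScan A B m n).1 + A.getD n 0, (aScan A B m n).2.1 + B.getD n 0,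
         (aScan A B m n).2.2 + 1) := by
  have hb : (2 ^ n + m).testBit n = true := by
    rw [Nat.testBit_two_pow_add_eq, Nat.testBit_lt_two_pow hm]; rfl
  simp [aScan, hb, aScan_add_pow A B n m n (le_refl n)]

theorem aScan_low (A B : List Int) (n m : Nat) (hm : m < 2 ^ n) :
    aScan A B m (n + 1) = aScan A B m n := by
  simp [aScan, Nat.testBit_lt_two_pow hm]

-- the main invariant: A's fold over all 2^n masks computes Mw on the reversed dish list
theorem fold_eq (X Y : Int) (A B : List Int) :
    ∀ (n : Nat) (sw sa co acc : Int),
      (List.range (2 ^ n)).foldl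
        (fun acc m =>
          let t := aScan A B m n
          if sw + t.1 ≤ X ∧ sa + t.2.1 ≤ Y then max acc (co + t.2.2) else acc) acc
      = match Mw X Y (items A B 0 n).reverse sw sa with
        | none => acc
        | some v => max acc (co + v) := by
  intro n
  induction n with
  | zero =>
    intro sw sa co acc
    simp only [pow_zero, List.range_one, List.foldl_cons, List.foldl_nil]
    simp [items, Mw, aScan]
    split <;> simp
  | succ n ih =>
    intro sw sa co acc
    have e2 : 2 ^ (n + 1) = 2 ^ n + 2 ^ n := by ring
    have hfirst :
        (List.range (2 ^ n)).foldl
          (fun acc m =>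
            let t := aScan A B m (n + 1)
            if sw + t.1 ≤ X ∧ sa + t.2.1 ≤ Y then max acc (co + t.2.2) else acc) acc
        = match Mw X Y (items A B 0 n).reverse sw sa with
          | none => acc
          | some v => max acc (co + v) := by
      have hc := PySem.List.foldl_congr_mem (List.range (2 ^ n))
        (fun acc m =>
          let t := aScan A B m (n + 1)
          if sw + t.1 ≤ X ∧ sa + t.2.1 ≤ Y then max acc (co + t.2.2) else acc)
        (fun acc m =>
          let t := aScan A B m n
          if sw + t.1 ≤ X ∧ sa + t.2.1 ≤ Y then max acc (co + t.2.2) else acc)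
        acc
        (fun acc m hm => by simp only [aScan_low A B n m (List.mem_range.mp hm)])
      rw [hc]
      exact ih sw sa co acc
    have hsecond : ∀ acc1 : Int,
        (List.range (2 ^ n)).foldl
          (fun x y =>
            let t := aScan A B (2 ^ n + y) (n + 1)
            if sw + t.1 ≤ X ∧ sa + t.2.1 ≤ Y then max x (co + t.2.2) else x) acc1
        = match Mw X Y (items A B 0 n).reverse (sw + A.getD n 0) (sa + B.getD n 0) with
          | none => acc1
          | some v => max acc1 (co + 1 + v) := by
      intro acc1
      have hc := PySem.List.foldl_congr_mem (List.range (2 ^ n))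
        (fun x y =>
          let t := aScan A B (2 ^ n + y) (n + 1)
          if sw + t.1 ≤ X ∧ sa + t.2.1 ≤ Y then max x (co + t.2.2) else x)
        (fun x y =>
          let t := aScan A B y n
          if (sw + A.getD n 0) + t.1 ≤ X ∧ (sa + B.getD n 0) + t.2.1 ≤ Y then
            max x (co + 1 + t.2.2) else x)
        acc1
        (fun x m hm => by
          have hlt := List.mem_range.mp hm
          simp only [aScan_high A B n m hlt]
          have e3 : sw + ((aScan A B m n).1 + A.getD n 0)
              = (sw + A.getD n 0) + (aScan A B m n).1 := by ring
          have e4 : sa + ((aScan A B m n).2.1 + B.getD n 0)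
              = (sa + B.getD n 0) + (aScan A B m n).2.1 := by ring
          have e5 : co + ((aScan A B m n).2.2 + 1) = co + 1 + (aScan A B m n).2.2 := by ring
          rw [e3, e4, e5])
      rw [hc]
      exact ih (sw + A.getD n 0) (sa + B.getD n 0) (co + 1) acc1
    rw [e2, List.range_add, List.foldl_append]
    simp only [List.foldl_map]
    rw [hfirst, hsecond]
    rw [items_last, List.reverse_append]
    simp only [List.reverse_singleton, List.singleton_append, Mw]
    rcases h0 : Mw X Y (items A B 0 n).reverse sw sa with _ | v0 <;>
      rcases h1 : Mw X Y (items A B 0 n).reverse (sw + A.getD n 0) (sa + B.getD n 0) with _ | v1 <;>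
        simp [omax]
    · have e6 : co + (v1 + 1) = co + 1 + v1 := by ring
      rw [e6]
    · have e6 : co + 1 + v1 = co + (v1 + 1) := by ring
      rw [e6, max_add_add_left]

-- ===== VERDICT (by name: the statement is the Claim_ definition above) =====
theorem max_dishes_spec : Claim_equal_max_dishes := by
  intro N X Y A B _ _
  unfold Spec_max_dishes max_dishes max_dishes_alt
  have key := fold_eq X Y A B N.toNat 0 0 0 0
  simp only [zero_add] at key
  have estep : aStep X Y A B N.toNat
      = fun acc m =>
          if (aScan A B m N.toNat).1 ≤ X ∧ (aScan A B m N.toNat).2.1 ≤ Y then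
            max acc (aScan A B m N.toNat).2.2 else acc := by
    funext acc m; simp [aStep]
  rw [estep, key, Mw_reverse, ← bGo_eq_Mw]
  cases h : bGo X Y A B N.toNat 0 0 0 with
  | none => rfl
  | some v =>
    have := Mw_nonneg X Y (items A B 0 N.toNat) 0 0 v (by rw [← bGo_eq_Mw]; exact h)
    simp [max_eq_right this]
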